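-- pv_equiv track=rewrite | github.com/abeadam/data_loading | tests/research/test_spy_sentiment_response.py | _find_bar_at_or_after
-- ===== SOURCE A (Python) =====
-- def _find_bar_at_or_after(sorted_timestamps: list[int], target_ts: int) -> int | None:
--     """Binary search for the first bar timestamp >= target_ts."""
--     lo, hi = 0, len(sorted_timestamps) - 1
--     result = None
--     while lo <= hi:
--         mid = (lo + hi) // 2
--         if sorted_timestamps[mid] >= target_ts:
--             result = sorted_timestamps[mid]
--             hi = mid - 1
--         else:
--             lo = mid + 1
--     return result
-- ===== SOURCE B (Python) =====
-- def _find_bar_at_or_after(sorted_timestamps: list[int], target_ts: int) -> int | None: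
--     """Single linear pass: return the first timestamp >= target_ts, else None."""
--     for ts in sorted_timestamps:
--         if ts >= target_ts:
--             return ts
--     return None
-- ===== Notes on version B (the rewrite author's own statement) =====
-- stated objective: simpler
-- what changed: Replaces the value-accumulating binary search (mutable lo/hi/result state) by a single left-to-right pass returning the first element >= target_ts, which on a sorted list is exactly the binary search's answer.
-- outside the precondition, e.g. on _find_bar_at_or_after([5, 0, 6], 1): A returns 6, B returns 5
import Mathlib
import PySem

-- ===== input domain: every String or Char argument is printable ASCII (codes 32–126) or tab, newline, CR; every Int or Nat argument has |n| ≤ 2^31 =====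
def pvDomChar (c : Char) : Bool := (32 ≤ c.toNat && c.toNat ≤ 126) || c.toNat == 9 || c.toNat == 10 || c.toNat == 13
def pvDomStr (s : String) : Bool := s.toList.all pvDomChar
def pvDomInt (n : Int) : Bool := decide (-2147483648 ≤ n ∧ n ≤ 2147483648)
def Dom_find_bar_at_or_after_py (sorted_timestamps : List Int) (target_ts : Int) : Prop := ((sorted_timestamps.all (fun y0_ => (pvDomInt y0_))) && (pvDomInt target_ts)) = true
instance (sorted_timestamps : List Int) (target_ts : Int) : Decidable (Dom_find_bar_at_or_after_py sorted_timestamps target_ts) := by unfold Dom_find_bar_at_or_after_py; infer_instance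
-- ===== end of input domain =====

-- B replaces the binary search by a single linear pass returning the first element
-- >= target_ts (objective: simpler; exact on sorted input, which Pre_ states).

-- ===== PORT A =====
-- mid = (lo + hi) // 2
def pymid (lo hi : Int) : Int := PySem.Int.floordiv (lo + hi) 2

-- while lo <= hi: mid = (lo+hi)//2; a success stores the value and moves hi, a failure moves lo.
-- sorted_timestamps[mid] is ported with pyGetD: 0 ≤ lo ≤ mid ≤ hi < len holds on every
-- reachable call, so the index is always in range and the default is never used (exact).
def find_bar_loopA (xs : List Int) (t : Int) (lo hi : Int) (result : Option Int) : Option Int :=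
  if h : lo ≤ hi then
    if PySem.List.pyGetD xs (pymid lo hi) 0 ≥ t then
      find_bar_loopA xs t lo (pymid lo hi - 1) (some (PySem.List.pyGetD xs (pymid lo hi) 0))
    else
      find_bar_loopA xs t (pymid lo hi + 1) hi result
  else result
termination_by (hi + 1 - lo).toNat
decreasing_by
  all_goals
    have hx : lo ≤ hi := by assumption
    have hb := PySem.Int.floordiv_two_mid_bounds hx
    simp only [pymid] at hb ⊢
    omega

def find_bar_at_or_after_py (sorted_timestamps : List Int) (target_ts : Int) : Option Int :=
  find_bar_loopA sorted_timestamps target_ts 0 ((sorted_timestamps.length : Int) - 1) none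

-- ===== PORT B =====
-- for ts in sorted_timestamps: if ts >= target_ts: return ts; fall through to None
def find_bar_scanB (xs : List Int) (t : Int) : Option Int :=
  match xs with
  | [] => none
  | x :: rest => if x ≥ t then some x else find_bar_scanB rest t

def find_bar_at_or_after_py_alt (sorted_timestamps : List Int) (target_ts : Int) : Option Int :=
  find_bar_scanB sorted_timestamps target_ts

-- ===== PRECONDITION & SPEC =====
-- Pre_ excludes exactly the lists violating the sortedness contract in a way that
-- matters here: some element ≥ target_ts precedes an element < target_ts (the "≥ target"
-- predicate is not monotone along the list), where A still returns but which element its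
-- binary-search probe order lands on is an accident of the implementation.
def Pre_find_bar_at_or_after_py (sorted_timestamps : List Int) (target_ts : Int) : Prop :=
  List.Pairwise (fun a b => target_ts ≤ a → target_ts ≤ b) sorted_timestamps
instance (sorted_timestamps : List Int) (target_ts : Int) : Decidable (Pre_find_bar_at_or_after_py sorted_timestamps target_ts) := by unfold Pre_find_bar_at_or_after_py; infer_instance

def pvWitness_find_bar_at_or_after_py : List Int × Int := ([1, 3, 5], 4)

def Spec_find_bar_at_or_after_py (sorted_timestamps : List Int) (target_ts : Int) (out : Option Int) : Prop := out = find_bar_at_or_after_py_alt sorted_timestamps target_ts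
instance (sorted_timestamps : List Int) (target_ts : Int) (out : Option Int) : Decidable (Spec_find_bar_at_or_after_py sorted_timestamps target_ts out) := by unfold Spec_find_bar_at_or_after_py; infer_instance

-- ===== CLAIM (what is proved, stated in full; the proofs are below) =====
def Claim_equal_find_bar_at_or_after_py : Prop := ∀ (sorted_timestamps : List Int) (target_ts : Int), Dom_find_bar_at_or_after_py sorted_timestamps target_ts → Pre_find_bar_at_or_after_py sorted_timestamps target_ts → Spec_find_bar_at_or_after_py sorted_timestamps target_ts (find_bar_at_or_after_py sorted_timestamps target_ts)

-- ===== LEMMAS AND PROOFS =====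

-- the scan ignores a prefix all of whose elements fail the test
theorem scanB_drop (xs : List Int) (t : Int) (n : Nat) (hn : n ≤ xs.length)
    (H : ∀ i : Nat, i < n → ∀ h : i < xs.length, xs[i] < t) :
    find_bar_scanB xs t = find_bar_scanB (xs.drop n) t := by
  induction n generalizing xs with
  | zero => simp
  | succ m ih =>
    cases xs with
    | nil => simp at hn
    | cons x rest =>
      have hx : x < t := H 0 (Nat.succ_pos m) (by simp)
      simp only [find_bar_scanB, if_neg (by omega : ¬ x ≥ t), List.drop_succ_cons]
      exact ih rest (by simpa using hn)
        (fun i hi h => by simpa using H (i+1) (by omega) (by simpa using h))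

-- if the head of the dropped suffix passes, the scan of that suffix returns it
theorem scanB_drop_hit (xs : List Int) (t : Int) (n : Nat) (hn : n < xs.length)
    (hx : xs[n] ≥ t) : find_bar_scanB (xs.drop n) t = some xs[n] := by
  rw [List.drop_eq_getElem_cons hn]
  simp [find_bar_scanB, hx]

-- loop invariant: indices < lo all fail, result is the scan of the suffix after hi
theorem find_bar_loopA_eq_scan (xs : List Int) (t : Int)
    (hs : List.Pairwise (fun a b => t ≤ a → t ≤ b) xs) (lo hi : Int) (result : Option Int)
    (h0 : 0 ≤ lo) (h1 : lo ≤ hi + 1) (h2 : hi < (xs.length : Int))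
    (H1 : ∀ i : Nat, (i : Int) < lo → ∀ h : i < xs.length, xs[i] < t)
    (H2 : result = find_bar_scanB (xs.drop (hi + 1).toNat) t) :
    find_bar_loopA xs t lo hi result = find_bar_scanB xs t := by
  rw [find_bar_loopA]
  split
  · rename_i h
    have hb := PySem.Int.floordiv_two_mid_bounds h
    rw [show PySem.Int.floordiv (lo + hi) 2 = pymid lo hi from rfl] at hb
    have hmlt : (pymid lo hi).toNat < xs.length := by omega
    have hget : PySem.List.pyGetD xs (pymid lo hi) 0 = xs[(pymid lo hi).toNat] :=
      PySem.List.pyGetD_eq_getElem xs 0 (by omega) (by omega)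
    split
    · rename_i hge
      rw [hget] at hge
      refine find_bar_loopA_eq_scan xs t hs lo (pymid lo hi - 1) _ h0 (by omega) (by omega) H1 ?_
      rw [hget, show (pymid lo hi - 1 + 1).toNat = (pymid lo hi).toNat from by omega]
      exact (scanB_drop_hit xs t _ hmlt hge).symm
    · rename_i hlt
      rw [hget] at hlt
      refine find_bar_loopA_eq_scan xs t hs (pymid lo hi + 1) hi result (by omega) (by omega) h2 ?_ H2
      intro i hi' h
      rcases lt_or_ge (i : Int) lo with hc | hc
      · exact H1 i hc h
      · have hij : i ≤ (pymid lo hi).toNat := by omega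
        rcases Nat.lt_or_ge i (pymid lo hi).toNat with hij' | hij'
        · have hmono := (List.pairwise_iff_getElem.mp hs) i (pymid lo hi).toNat h hmlt hij'
          by_cases hti : t ≤ xs[i]
          · exact absurd (hmono hti) (by omega)
          · omega
        · have : i = (pymid lo hi).toNat := by omega
          simpa [this] using hlt
  · rename_i h
    have hlo : lo = hi + 1 := by omega
    rw [H2, ← hlo]
    exact (scanB_drop xs t lo.toNat (by omega)
      (fun i hi' h' => H1 i (by omega) h')).symm
termination_by (hi + 1 - lo).toNat
decreasing_by
  all_goals
    have hx : lo ≤ hi := by assumption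
    have hb := PySem.Int.floordiv_two_mid_bounds hx
    simp only [pymid] at hb ⊢
    omega

-- ===== VERDICT (by name: the statement is the Claim_ definition above) =====
theorem find_bar_at_or_after_py_spec : Claim_equal_find_bar_at_or_after_py := by
  intro xs t _ hpre
  unfold Spec_find_bar_at_or_after_py find_bar_at_or_after_py find_bar_at_or_after_py_alt
  exact find_bar_loopA_eq_scan xs t hpre 0 ((xs.length : Int) - 1) none
    le_rfl (by omega) (by omega)
    (fun i hi _ => by omega)
    (by simp [find_bar_scanB])
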